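-- pv_equiv track=rewrite | github.com/Clamepending/remote-vibes | experiments/arc-swarm/runs/hybrid/solver.py | gravity_up
-- ===== SOURCE A (Python) =====
-- Grid = list[list[int]]
--
-- def gravity_up(g: Grid) -> Grid:
--     """Collapse non-zero cells upward, column-wise, preserving order."""
--     h = len(g)
--     w = len(g[0])
--     out = [[0] * w for _ in range(h)]
--     for c in range(w):
--         col = [g[r][c] for r in range(h) if g[r][c] != 0]
--         for r, v in enumerate(col):
--             out[r][c] = v
--     return out
-- ===== SOURCE B (Python) =====
-- def gravity_up(g):
--     """Collapse non-zero cells upward, column-wise, preserving order."""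
--     h = len(g)
--     w = len(g[0])
--     out = [[0] * w for _ in range(h)]
--     fill = [0] * w
--     for row in g:
--         for c in range(w):
--             v = row[c]
--             if v != 0:
--                 out[fill[c]][c] = v
--                 fill[c] += 1
--     return out
-- ===== Notes on version B (the rewrite author's own statement) =====
-- stated objective: alternative
-- what changed: Replaces A's per-column extract-then-place two-pass (building each column's nonzero list, then writing it back) with a single row-major sweep that keeps a per-column write pointer and places each nonzero cell immediately, avoiding the intermediate column lists.
import Mathlib
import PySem

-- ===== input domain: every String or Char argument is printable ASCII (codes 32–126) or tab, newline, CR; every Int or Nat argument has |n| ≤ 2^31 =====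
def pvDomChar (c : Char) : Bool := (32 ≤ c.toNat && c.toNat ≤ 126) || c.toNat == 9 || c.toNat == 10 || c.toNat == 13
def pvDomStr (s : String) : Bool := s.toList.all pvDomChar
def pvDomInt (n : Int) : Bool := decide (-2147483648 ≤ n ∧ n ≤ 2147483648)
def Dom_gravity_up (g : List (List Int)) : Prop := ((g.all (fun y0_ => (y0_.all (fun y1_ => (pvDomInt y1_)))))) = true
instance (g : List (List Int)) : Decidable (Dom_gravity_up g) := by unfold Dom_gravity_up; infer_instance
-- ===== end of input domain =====

-- B replaces A's per-column extract-then-place two-pass with a single row-major sweep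
-- keeping a per-column write pointer; no intermediate column lists are built (constant-factor gain).

-- shared helper: the statement `out[r][c] = v` (indices are in range wherever the ports use it)
def pvSetCell (m : List (List Int)) (r c : Nat) (v : Int) : List (List Int) :=
  m.modify r (fun row => row.set c v)

-- ===== PORT A =====
def gravity_up (g : List (List Int)) : List (List Int) :=
  let h := g.length
  let w := (g.headD []).length
  let out : List (List Int) := (List.range h).map (fun _ => List.replicate w (0 : Int))
  (List.range w).foldl (fun out c =>
    let col : List Int := (List.range h).filterMap (fun r =>
      if (g.getD r []).getD c 0 ≠ 0 then some ((g.getD r []).getD c 0) else none)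
    (col.zipIdx).foldl (fun out vr => pvSetCell out vr.2 c vr.1) out) out

-- ===== PORT B =====
def gravity_up_alt (g : List (List Int)) : List (List Int) :=
  let h := g.length
  let w := (g.headD []).length
  let st0 : List (List Int) × List Nat :=
    ((List.range h).map (fun _ => List.replicate w (0 : Int)), List.replicate w 0)
  (g.foldl (fun st row =>
    (List.range w).foldl (fun st c =>
      let v := row.getD c 0
      if v ≠ 0 then (pvSetCell st.1 (st.2.getD c 0) c v, st.2.set c (st.2.getD c 0 + 1))
      else st) st) st0).1

-- ===== PRECONDITION & SPEC =====
-- Pre_ excludes exactly the inputs on which the Python A raises IndexError: the empty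
-- grid (g[0]) and ragged grids with a row shorter than the first row (g[r][c]).
def Pre_gravity_up (g : List (List Int)) : Prop :=
  g ≠ [] ∧ ∀ row ∈ g, (g.headD []).length ≤ row.length
instance (g : List (List Int)) : Decidable (Pre_gravity_up g) := by unfold Pre_gravity_up; infer_instance
def pvWitness_gravity_up : List (List Int) := [[0, 1], [2, 0]]

def Spec_gravity_up (g : List (List Int)) (out : List (List Int)) : Prop := out = gravity_up_alt g
instance (g : List (List Int)) (out : List (List Int)) : Decidable (Spec_gravity_up g out) := by unfold Spec_gravity_up; infer_instance

-- ===== CLAIM (what is proved, stated in full; the proofs are below) =====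
def Claim_equal_gravity_up : Prop := ∀ (g : List (List Int)), Dom_gravity_up g → Pre_gravity_up g → Spec_gravity_up g (gravity_up g)

-- ===== LEMMAS AND PROOFS =====

def pvEnt (m : List (List Int)) (r c : Nat) : Int := (m.getD r []).getD c 0
def pvShape (m : List (List Int)) (h w : Nat) : Prop :=
  m.length = h ∧ ∀ row ∈ m, row.length = w

theorem pvShape_setCell {m : List (List Int)} {h w : Nat} (hs : pvShape m h w)
    (r c : Nat) (v : Int) : pvShape (pvSetCell m r c v) h w := by
  obtain ⟨hl, hrow⟩ := hs
  unfold pvSetCell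
  constructor
  · simpa using hl
  · intro row hmem
    obtain ⟨j, hj, rfl⟩ := List.mem_iff_getElem.1 hmem
    rw [List.getElem_modify]
    split_ifs
    · rw [List.length_set]
      exact hrow _ (List.getElem_mem _)
    · exact hrow _ (List.getElem_mem _)

theorem pvEnt_setCell {m : List (List Int)} {h w : Nat} (hs : pvShape m h w)
    {r c : Nat} (hr : r < h) (hc : c < w) (v : Int) (r' c' : Nat) :
    pvEnt (pvSetCell m r c v) r' c' = if r' = r ∧ c' = c then v else pvEnt m r' c' := by
  obtain ⟨hl, hrow⟩ := hs
  have hrm : r < m.length := hl ▸ hr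
  have hwr : m[r].length = w := hrow _ (List.getElem_mem hrm)
  unfold pvEnt pvSetCell
  by_cases hrr : r' = r
  · rw [hrr]
    rw [List.getD_eq_getElem (m.modify r (fun row => row.set c v)) [] (by simpa using hrm),
        List.getElem_modify]
    simp only [if_pos trivial]
    rw [List.getD_eq_getElem m [] hrm]
    by_cases hcc : c' = c
    · rw [hcc]
      rw [List.getD_eq_getElem _ 0 (by rw [List.length_set]; omega)]
      simp
    · simp only [hcc, and_false, if_false]
      rw [List.getD_eq_getElem?_getD, List.getD_eq_getElem?_getD,
          List.getElem?_set_ne (Ne.symm hcc)]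
  · simp only [hrr, false_and, if_false]
    congr 1
    rw [List.getD_eq_getElem?_getD, List.getD_eq_getElem?_getD]
    congr 1
    rw [List.getElem?_modify]
    rcases Nat.lt_or_ge r' m.length with h1 | h1
    · simp [List.getElem?_eq_getElem h1, (Ne.symm hrr : r ≠ r')]
    · simp [List.getElem?_eq_none h1]

def pvNz (g : List (List Int)) (c : Nat) : List Int :=
  (g.map (fun row => row.getD c 0)).filter (fun v => decide (v ≠ 0))

theorem pvMat_ext {m₁ m₂ : List (List Int)} {h w : Nat}
    (h₁ : pvShape m₁ h w) (h₂ : pvShape m₂ h w)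
    (he : ∀ r < h, ∀ c < w, pvEnt m₁ r c = pvEnt m₂ r c) : m₁ = m₂ := by
  obtain ⟨hl₁, hr₁⟩ := h₁
  obtain ⟨hl₂, hr₂⟩ := h₂
  apply List.ext_getElem (by omega)
  intro r hra hrb
  apply List.ext_getElem
  · rw [hr₁ _ (List.getElem_mem _), hr₂ _ (List.getElem_mem _)]
  · intro c hca hcb
    have hrh : r < h := hl₁ ▸ hra
    have hcw : c < w := (hr₁ _ (List.getElem_mem hra)) ▸ hca
    have := he r hrh c hcw
    unfold pvEnt at this
    rwa [List.getD_eq_getElem m₁ [] hra, List.getD_eq_getElem m₂ [] hrb,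
         List.getD_eq_getElem _ 0 hca, List.getD_eq_getElem _ 0 hcb] at this

theorem pvNz_length_le (g : List (List Int)) (c : Nat) : (pvNz g c).length ≤ g.length := by
  calc (pvNz g c).length ≤ (g.map (fun row => row.getD c 0)).length := List.length_filter_le _ _
    _ = g.length := List.length_map ..

theorem pvNz_append_singleton (pre : List (List Int)) (row : List Int) (c : Nat) :
    pvNz (pre ++ [row]) c =
      pvNz pre c ++ (if row.getD c 0 ≠ 0 then [row.getD c 0] else []) := by
  unfold pvNz
  rw [List.map_append, List.filter_append]
  congr 1
  rw [List.getD_eq_getElem?_getD]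
  by_cases hv : row[c]?.getD 0 = 0 <;> simp [hv]

theorem pvFilterMap_if (l : List Nat) (F : Nat → Int) :
    l.filterMap (fun x => if F x ≠ 0 then some (F x) else none)
      = (l.map F).filter (fun v => decide (v ≠ 0)) := by
  induction l with
  | nil => simp
  | cons x xs ih =>
    have ih' : List.filterMap (fun x => if F x = 0 then none else some (F x)) xs =
        List.filter (fun v => !decide (v = 0)) (List.map F xs) := by
      simpa [ite_not, decide_not] using ih
    by_cases hv : F x = 0 <;> simp [hv, ih']

theorem pvColA (g : List (List Int)) (c : Nat) :
    (List.range g.length).filterMap (fun r =>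
      if (g.getD r []).getD c 0 ≠ 0 then some ((g.getD r []).getD c 0) else none) = pvNz g c := by
  rw [pvFilterMap_if (List.range g.length) (fun r => (g.getD r []).getD c 0)]
  unfold pvNz
  congr 1
  rw [show (fun r => (g.getD r []).getD c 0) = ((fun row : List Int => row.getD c 0) ∘ (fun r => g.getD r [])) from rfl,
      ← List.map_map]
  congr 1
  apply List.ext_getElem
  · simp
  · intro i h1 h2
    simp [List.getElem?_eq_getElem h2]

theorem pvA_inner {h w : Nat} (c : Nat) (hc : c < w) (col : List Int) :
    ∀ (m : List (List Int)) (k : Nat), pvShape m h w → k + col.length ≤ h →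
    pvShape ((col.zipIdx k).foldl (fun out vr => pvSetCell out vr.2 c vr.1) m) h w ∧
    ∀ r' c', pvEnt ((col.zipIdx k).foldl (fun out vr => pvSetCell out vr.2 c vr.1) m) r' c' =
      if c' = c ∧ k ≤ r' ∧ r' < k + col.length then col.getD (r' - k) 0 else pvEnt m r' c' := by
  induction col with
  | nil =>
    intro m k hs _
    refine ⟨hs, ?_⟩
    intro r' c'
    rw [if_neg (by rintro ⟨_, h1, h2⟩; simp at h2; omega)]
    rfl
  | cons v col ih =>
    intro m k hs hk
    rw [List.zipIdx_cons, List.foldl_cons]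
    have hkh : k < h := by simp at hk; omega
    obtain ⟨ihs, ihe⟩ := ih (pvSetCell m k c v) (k + 1) (pvShape_setCell hs k c v)
      (by simp at hk ⊢; omega)
    refine ⟨ihs, ?_⟩
    intro r' c'
    rw [ihe r' c', pvEnt_setCell hs hkh hc v r' c']
    by_cases hcc : c' = c
    · by_cases hr3 : r' = k
      · rw [if_neg (by rintro ⟨_, h1, _⟩; omega), if_pos ⟨hr3, hcc⟩,
            if_pos ⟨hcc, by omega, by simp; omega⟩, hr3]
        simp
      · by_cases hr1 : k ≤ r'
        · by_cases hr2 : r' < k + 1 + col.length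
          · rw [if_pos ⟨hcc, by omega, by omega⟩, if_pos ⟨hcc, hr1, by simp; omega⟩]
            have he : r' - k = (r' - (k + 1)) + 1 := by omega
            rw [he, List.getD_cons_succ]
          · rw [if_neg (by rintro ⟨_, _, h2⟩; omega), if_neg (by rintro ⟨h1, _⟩; exact hr3 h1),
                if_neg (by rintro ⟨_, _, h2⟩; simp at h2; omega)]
        · rw [if_neg (by rintro ⟨_, h1, _⟩; omega), if_neg (by rintro ⟨h1, _⟩; exact hr3 h1),
              if_neg (by rintro ⟨_, h1, _⟩; omega)]
    · rw [if_neg (by rintro ⟨h1, _⟩; exact hcc h1), if_neg (by rintro ⟨_, h1⟩; exact hcc h1),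
          if_neg (by rintro ⟨h1, _⟩; exact hcc h1)]

theorem pvA_outer {g : List (List Int)} {h w : Nat} (hh : h = g.length) (cs : List Nat) :
    ∀ (m : List (List Int)), cs.Nodup → (∀ c ∈ cs, c < w) → pvShape m h w →
    (∀ c ∈ cs, ∀ r', pvEnt m r' c = 0) →
    pvShape (cs.foldl (fun out c =>
      (((List.range h).filterMap (fun r =>
        if (g.getD r []).getD c 0 ≠ 0 then some ((g.getD r []).getD c 0) else none)).zipIdx).foldl
        (fun out vr => pvSetCell out vr.2 c vr.1) out) m) h w ∧
    ∀ r' c', r' < h → c' < w →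
      pvEnt (cs.foldl (fun out c =>
        (((List.range h).filterMap (fun r =>
          if (g.getD r []).getD c 0 ≠ 0 then some ((g.getD r []).getD c 0) else none)).zipIdx).foldl
          (fun out vr => pvSetCell out vr.2 c vr.1) out) m) r' c' =
        if c' ∈ cs then (pvNz g c').getD r' 0 else pvEnt m r' c' := by
  subst hh
  induction cs with
  | nil =>
    intro m _ _ hs _
    exact ⟨hs, fun r' c' _ _ => by simp⟩
  | cons c0 cs ih =>
    intro m hnd hlt hs hz
    rw [List.foldl_cons]
    obtain ⟨hnd0, hndt⟩ := List.nodup_cons.1 hnd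
    have hc0 : c0 < w := hlt c0 List.mem_cons_self
    have hcol := pvColA g c0
    have hlen : ((List.range g.length).filterMap (fun r =>
        if (g.getD r []).getD c0 0 ≠ 0 then some ((g.getD r []).getD c0 0) else none)).length
        ≤ g.length := by rw [hcol]; exact pvNz_length_le g c0
    obtain ⟨is, ie⟩ := pvA_inner (h := g.length) (w := w) c0 hc0
      ((List.range g.length).filterMap (fun r =>
        if (g.getD r []).getD c0 0 ≠ 0 then some ((g.getD r []).getD c0 0) else none))
      m 0 hs (by omega)
    obtain ⟨os, oe⟩ := ih _ hndt (fun c hc => hlt c (List.mem_cons_of_mem _ hc)) is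
      (by
        intro c hc r'
        rw [ie r' c, if_neg (by rintro ⟨h1, _⟩; exact hnd0 (h1 ▸ hc))]
        exact hz c (List.mem_cons_of_mem _ hc) r')
    refine ⟨os, ?_⟩
    intro r' c' hr hcw
    rw [oe r' c' hr hcw]
    by_cases hmem : c' ∈ cs
    · rw [if_pos hmem, if_pos (List.mem_cons_of_mem _ hmem)]
    · rw [if_neg hmem, ie r' c']
      by_cases hcc : c' = c0
      · rw [hcc, if_pos List.mem_cons_self]
        by_cases hrl : r' < (pvNz g c0).length
        · rw [if_pos ⟨rfl, Nat.zero_le r', by rw [Nat.zero_add, hcol]; exact hrl⟩,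
              Nat.sub_zero, hcol]
        · rw [if_neg (by rintro ⟨_, _, h2⟩; rw [Nat.zero_add, hcol] at h2; exact hrl h2),
              List.getD_eq_default _ _ (by omega)]
          exact hz c0 List.mem_cons_self r'
      · rw [if_neg (by rintro ⟨h1, _⟩; exact hcc h1),
            if_neg (by intro hm; rcases List.mem_cons.1 hm with h1 | h1; exact hcc h1; exact hmem h1)]

theorem pvSetGetD (l : List Nat) (i j v : Nat) :
    (l.set i v).getD j 0 = if i = j ∧ i < l.length then v else l.getD j 0 := by
  rw [List.getD_eq_getElem?_getD, List.getD_eq_getElem?_getD, List.getElem?_set]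
  by_cases hij : i = j
  · subst hij
    by_cases hil : i < l.length
    · simp [hil]
    · rw [if_pos rfl, if_neg hil, if_neg (by rintro ⟨_, h⟩; exact hil h),
          List.getElem?_eq_none (by omega)]
  · simp [hij]

def pvBstep (row : List Int) : (List (List Int) × List Nat) → Nat → (List (List Int) × List Nat) :=
  fun st c =>
    if row.getD c 0 ≠ 0 then
      (pvSetCell st.1 (st.2.getD c 0) c (row.getD c 0), st.2.set c (st.2.getD c 0 + 1))
    else st

theorem pvB_inner {h w : Nat} (row : List Int) (cs : List Nat) :
    ∀ (m : List (List Int)) (fill : List Nat), cs.Nodup → (∀ c ∈ cs, c < w) →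
    pvShape m h w → fill.length = w → (∀ c ∈ cs, fill.getD c 0 < h) →
    pvShape (cs.foldl (pvBstep row) (m, fill)).1 h w ∧
    (cs.foldl (pvBstep row) (m, fill)).2.length = w ∧
    (∀ c', (cs.foldl (pvBstep row) (m, fill)).2.getD c' 0 =
        if c' ∈ cs ∧ row.getD c' 0 ≠ 0 then fill.getD c' 0 + 1 else fill.getD c' 0) ∧
    (∀ r' c', pvEnt (cs.foldl (pvBstep row) (m, fill)).1 r' c' =
        if c' ∈ cs ∧ row.getD c' 0 ≠ 0 ∧ r' = fill.getD c' 0 then row.getD c' 0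
        else pvEnt m r' c') := by
  induction cs with
  | nil =>
    intro m fill _ _ hs hfl _
    exact ⟨hs, hfl, fun c' => by simp, fun r' c' => by simp⟩
  | cons c0 cs ih =>
    intro m fill hnd hlt hs hfl hfh
    obtain ⟨hnd0, hndt⟩ := List.nodup_cons.1 hnd
    have hc0w : c0 < w := hlt c0 List.mem_cons_self
    have hc0f : c0 < fill.length := by omega
    have hlt' : ∀ c ∈ cs, c < w := fun c hc => hlt c (List.mem_cons_of_mem _ hc)
    rw [List.foldl_cons]
    by_cases hv : row.getD c0 0 ≠ 0
    · have hstep : pvBstep row (m, fill) c0 =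
        (pvSetCell m (fill.getD c0 0) c0 (row.getD c0 0), fill.set c0 (fill.getD c0 0 + 1)) := by
        simp only [pvBstep]; rw [if_pos hv]
      rw [hstep]
      have hf0 : fill.getD c0 0 < h := hfh c0 List.mem_cons_self
      obtain ⟨is, ifl, ifill, ie⟩ := ih (pvSetCell m (fill.getD c0 0) c0 (row.getD c0 0))
        (fill.set c0 (fill.getD c0 0 + 1)) hndt hlt' (pvShape_setCell hs _ _ _)
        (by rw [List.length_set]; exact hfl)
        (by
          intro c hc
          rw [pvSetGetD, if_neg (by rintro ⟨h1, _⟩; exact hnd0 (h1 ▸ hc))]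
          exact hfh c (List.mem_cons_of_mem _ hc))
      clear ih hstep
      refine ⟨is, ifl, ?_, ?_⟩
      · intro c'
        rw [ifill c', pvSetGetD]
        clear ifill ie is ifl
        by_cases hcc : c' = c0
        · subst hcc
          simp_all
        · have hcc' : ¬ c0 = c' := fun hx => hcc hx.symm
          by_cases hm1 : c' ∈ cs <;> by_cases hv' : row.getD c' 0 = 0 <;>
            simp_all
      · intro r' c'
        rw [ie r' c', pvEnt_setCell hs hf0 hc0w, pvSetGetD]
        clear ifill ie is ifl
        by_cases hcc : c' = c0
        · subst hcc
          by_cases hr : r' = fill.getD c' 0 <;> simp_all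
        · have hcc' : ¬ c0 = c' := fun hx => hcc hx.symm
          by_cases hm1 : c' ∈ cs <;> by_cases hv' : row.getD c' 0 = 0 <;>
            by_cases hr : r' = fill.getD c' 0 <;> simp_all
    · have hstep : pvBstep row (m, fill) c0 = (m, fill) := by
        simp only [pvBstep]; rw [if_neg hv]
      rw [hstep]
      rw [not_not] at hv
      obtain ⟨is, ifl, ifill, ie⟩ := ih m fill hndt hlt' hs hfl
        (fun c hc => hfh c (List.mem_cons_of_mem _ hc))
      clear ih hstep
      refine ⟨is, ifl, ?_, ?_⟩
      · intro c'
        rw [ifill c']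
        clear ifill ie is ifl
        by_cases hcc : c' = c0
        · subst hcc
          simp_all
        · by_cases hm1 : c' ∈ cs <;> by_cases hv' : row.getD c' 0 = 0 <;>
            simp_all
      · intro r' c'
        rw [ie r' c']
        clear ifill ie is ifl
        by_cases hcc : c' = c0
        · subst hcc
          simp_all
        · by_cases hm1 : c' ∈ cs <;> by_cases hv' : row.getD c' 0 = 0 <;>
            by_cases hr : r' = fill.getD c' 0 <;> simp_all

theorem pvGetD_append_length (l ys : List Int) (x : Int) :
    (l ++ x :: ys).getD l.length 0 = x := by
  rw [List.getD_eq_getElem?_getD, List.getElem?_append_right (le_refl _)]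
  simp

theorem pvGetD_append_left (l ys : List Int) (n : Nat) (hn : n < l.length) :
    (l ++ ys).getD n 0 = l.getD n 0 := by
  rw [List.getD_eq_getElem?_getD, List.getD_eq_getElem?_getD, List.getElem?_append_left hn]

theorem pvB_outer {g : List (List Int)} {h w : Nat} (hh : h = g.length) (rest : List (List Int)) :
    ∀ (pre m : List (List Int)) (fill : List Nat),
    pre ++ rest = g → pvShape m h w → fill.length = w →
    (∀ c < w, fill.getD c 0 = (pvNz pre c).length) →
    (∀ r' < h, ∀ c' < w, pvEnt m r' c' = (pvNz pre c').getD r' 0) →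
    pvShape (rest.foldl (fun st row => (List.range w).foldl (pvBstep row) st) (m, fill)).1 h w ∧
    ∀ r' < h, ∀ c' < w,
      pvEnt (rest.foldl (fun st row => (List.range w).foldl (pvBstep row) st) (m, fill)).1 r' c' =
        (pvNz g c').getD r' 0 := by
  induction rest with
  | nil =>
    intro pre m fill hpre hs _ _ he
    rw [List.append_nil] at hpre
    subst hpre
    exact ⟨hs, he⟩
  | cons row rest ih =>
    intro pre m fill hpre hs hfl hfc he
    rw [List.foldl_cons]
    have hprel : pre.length < g.length := by
      rw [← hpre, List.length_append, List.length_cons]; omega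
    obtain ⟨is, ifl, ifill, ie⟩ := pvB_inner (h := h) (w := w) row (List.range w) m fill
      List.nodup_range (fun c hc => List.mem_range.1 hc) hs hfl
      (fun c hc => by
        rw [hfc c (List.mem_range.1 hc)]
        have := pvNz_length_le pre c
        omega)
    apply ih (pre ++ [row]) _ _ (by rw [← hpre]; simp) is ifl
    · intro c hc
      rw [ifill c, pvNz_append_singleton, hfc c hc]
      by_cases hv : row.getD c 0 = 0 <;>
        · rw [List.getD_eq_getElem?_getD] at hv
          simp [hv, List.mem_range.2 hc]
    · intro r' hr c' hc
      rw [ie r' c', pvNz_append_singleton, hfc c' hc]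
      by_cases hv : row.getD c' 0 = 0
      · rw [if_neg (by rintro ⟨_, h1, _⟩; exact h1 hv), he r' hr c' hc]
        rw [List.getD_eq_getElem?_getD] at hv
        simp [hv]
      · by_cases hr2 : r' = (pvNz pre c').length
        · rw [if_pos ⟨List.mem_range.2 hc, hv, hr2⟩, hr2, if_pos hv, pvGetD_append_length]
        · rw [if_neg (by rintro ⟨_, _, h1⟩; exact hr2 h1), he r' hr c' hc]
          rcases Nat.lt_or_ge r' (pvNz pre c').length with h1 | h1
          · rw [pvGetD_append_left _ _ _ h1]
          · rw [List.getD_eq_default _ _ h1, List.getD_eq_default]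
            rw [List.length_append, if_pos hv, List.length_cons]
            simp
            omega

def pvZeroMat (h w : Nat) : List (List Int) :=
  (List.range h).map (fun _ => List.replicate w (0 : Int))

theorem pvShape_zeroMat (h w : Nat) : pvShape (pvZeroMat h w) h w := by
  constructor
  · simp [pvZeroMat]
  · intro row hrow
    simp [pvZeroMat] at hrow
    obtain ⟨_, _, rfl⟩ := hrow
    simp

theorem pvEnt_zeroMat (h w r c : Nat) : pvEnt (pvZeroMat h w) r c = 0 := by
  unfold pvEnt pvZeroMat
  simp only [List.getD_eq_getElem?_getD, List.getElem?_map]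
  rcases Nat.lt_or_ge r h with hr | hr <;> simp [hr, List.getElem?_replicate]
  split_ifs <;> simp

theorem pvA_char (g : List (List Int)) :
    pvShape (gravity_up g) g.length (g.headD []).length ∧
    ∀ r' < g.length, ∀ c' < (g.headD []).length,
      pvEnt (gravity_up g) r' c' = (pvNz g c').getD r' 0 := by
  have e : gravity_up g = (List.range ((g.headD []).length)).foldl (fun out c =>
      ((((List.range g.length).filterMap (fun r =>
        if (g.getD r []).getD c 0 ≠ 0 then some ((g.getD r []).getD c 0) else none))).zipIdx).foldl
        (fun out vr => pvSetCell out vr.2 c vr.1) out) (pvZeroMat g.length ((g.headD []).length)) := rfl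
  obtain ⟨os, oe⟩ := pvA_outer (g := g) (w := (g.headD []).length) rfl
    (List.range ((g.headD []).length)) (pvZeroMat g.length ((g.headD []).length))
    List.nodup_range (fun c hc => List.mem_range.1 hc) (pvShape_zeroMat _ _)
    (fun c _ r' => pvEnt_zeroMat _ _ _ _)
  rw [e]
  exact ⟨os, fun r' hr c' hc => by rw [oe r' c' hr hc, if_pos (List.mem_range.2 hc)]⟩

theorem pvB_char (g : List (List Int)) :
    pvShape (gravity_up_alt g) g.length (g.headD []).length ∧
    ∀ r' < g.length, ∀ c' < (g.headD []).length,
      pvEnt (gravity_up_alt g) r' c' = (pvNz g c').getD r' 0 := by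
  have e : gravity_up_alt g = (g.foldl (fun st row =>
      (List.range ((g.headD []).length)).foldl (pvBstep row) st)
      (pvZeroMat g.length ((g.headD []).length),
       List.replicate ((g.headD []).length) 0)).1 := rfl
  obtain ⟨os, oe⟩ := pvB_outer (g := g) (w := (g.headD []).length) rfl g
    [] (pvZeroMat g.length ((g.headD []).length)) (List.replicate ((g.headD []).length) 0)
    (by simp) (pvShape_zeroMat _ _) (by simp)
    (fun c hc => by
      rw [List.getD_eq_getElem?_getD, List.getElem?_replicate, if_pos hc]
      simp [pvNz])
    (fun r' _ c' _ => by rw [pvEnt_zeroMat]; simp [pvNz])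
  rw [e]
  exact ⟨os, oe⟩

theorem pv_eq (g : List (List Int)) : gravity_up g = gravity_up_alt g := by
  obtain ⟨hsa, hea⟩ := pvA_char g
  obtain ⟨hsb, heb⟩ := pvB_char g
  exact pvMat_ext hsa hsb (fun r hr c hc => (hea r hr c hc).trans (heb r hr c hc).symm)

-- ===== VERDICT (by name: the statement is the Claim_ definition above) =====
theorem gravity_up_spec : Claim_equal_gravity_up := by
  intro g _ _
  unfold Spec_gravity_up
  exact pv_eq g
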